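-- pv_equiv track=rewrite | github.com/gianni-x/Tp-2-Python- | kdominante.py | suma_cero_dominantes_menores
-- ===== SOURCE A (Python) =====
-- def cantidad_de_0(s:str) -> int:
--     '''
--     Requiere: Un string
--     Devuelve: Ocurrencias de 0 en el string.
--     '''
--     i:int = 0
--     cantcero:int = 0
--     while i < len(s):
--         if s[i] == '0':
--             cantcero = cantcero + 1
--         i = i + 1
--     return cantcero
--
-- def cantidad_de_1(s:str) -> int:
--     '''
--     Requiere: Un string
--     Devuelve: Ocurrencias de 1 en el string.
--     '''
--     cantuno:int = 0
--     i:int = 0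
--     while i < len(s):
--         if s[i] == '1':
--             cantuno = cantuno + 1
--         i = i + 1
--
--     return cantuno
--
-- def es_kdominante(k:int , n:int) -> bool:
--     '''
--     Requiere: k ∈ {0, 1}, n ∈ N
--     Devuelve: True si el número es k-dominante, False en caso contrario.
--     '''
--     binario = bin(n)[2:]
--     ceros = cantidad_de_0(str(binario))
--     unos = cantidad_de_1(str(binario))
--
--     if k == 1 and unos > ceros:
--             return True
--     if k == 0 and ceros > unos:
--             return True
--     else:
--         return False
--
-- def suma_cero_dominantes_menores(n:int) -> int:
--     '''
--     Requiere: n ∈ N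
--     Devuelve: La suma de todos los números 0-dominantes estrictamente menores que n.
--     '''
--     i:int = 0
--     vr:int = 0
--     while i < n:
--         if es_kdominante(0, i) == True:
--             vr = vr + i
--         i = i + 1
--     return vr
-- ===== SOURCE B (Python) =====
-- def suma_cero_dominantes_menores(n: int) -> int:
--     # One pass 0..n-1 with shared-subproblem tables: popcount and bit-length of i
--     # come from i >> 1, so no binary string is ever built or scanned.
--     total = 0
--     pc = []  # pc[i] = number of 1 bits of i
--     bl = []  # bl[i] = number of binary digits of i (bin(0) -> '0' has 1 digit)
--     for i in range(n):
--         if i <= 1: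
--             pc.append(i)
--             bl.append(1)
--         else:
--             pc.append(pc[i >> 1] + (i & 1))
--             bl.append(bl[i >> 1] + 1)
--         if 2 * pc[i] < bl[i]:
--             total += i
--     return total
-- ===== Notes on version B (the rewrite author's own statement) =====
-- stated objective: faster
-- what changed: A converts every i < n to a binary string and scans it twice per element; B never builds a string: it fills popcount and bit-length tables by the shared-subproblem recurrences pc[i]=pc[i>>1]+(i&1), bl[i]=bl[i>>1]+1 in the same single pass that accumulates the sum.
import Mathlib
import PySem

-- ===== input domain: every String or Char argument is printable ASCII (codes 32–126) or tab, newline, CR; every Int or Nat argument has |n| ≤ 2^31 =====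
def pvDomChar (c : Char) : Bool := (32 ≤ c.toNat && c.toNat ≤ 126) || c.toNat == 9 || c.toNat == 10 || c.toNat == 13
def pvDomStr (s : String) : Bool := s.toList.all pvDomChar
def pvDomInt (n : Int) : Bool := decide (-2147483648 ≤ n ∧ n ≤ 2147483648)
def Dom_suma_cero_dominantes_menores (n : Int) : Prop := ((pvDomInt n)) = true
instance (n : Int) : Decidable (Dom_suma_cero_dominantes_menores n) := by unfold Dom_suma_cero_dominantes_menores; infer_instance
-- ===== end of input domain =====

-- B replaces A's per-element binary-string build-and-scan by popcount/bit-length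
-- tables filled from i >> 1 in one pass (objective: faster).

-- ===== PORT A =====
-- while i < len(s): count '0' — the index loop is the obvious fold over the chars
def cantidad_de_0 (s : List Char) : Int :=
  s.foldl (fun cantcero c => if c = '0' then cantcero + 1 else cantcero) 0

def cantidad_de_1 (s : List Char) : Int :=
  s.foldl (fun cantuno c => if c = '1' then cantuno + 1 else cantuno) 0

def es_kdominante (k : Int) (n : Int) : Bool :=
  let binario := PySem.List.slice (PySem.Int.toBinChars0b n) (some 2) none  -- bin(n)[2:]
  let ceros := cantidad_de_0 binario
  let unos := cantidad_de_1 binario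
  if k = 1 ∧ unos > ceros then true
  else if k = 0 ∧ ceros > unos then true
  else false

def suma_cero_dominantes_menores (n : Int) : Int :=
  -- while i < n with i starting at 0 = fold over range(n)
  (List.range n.toNat).foldl
    (fun vr (i : Nat) => if es_kdominante 0 (i : Int) = true then vr + (i : Int) else vr) 0

-- ===== PORT B =====
def suma_cero_dominantes_menores_alt (n : Int) : Int :=
  ((List.range n.toNat).foldl
    (fun (st : List Int × List Int × Int) (i : Nat) =>
      let pc := st.1
      let bl := st.2.1
      let total := st.2.2
      let (pc, bl) :=
        if i ≤ 1 then (pc ++ [(i : Int)], bl ++ [(1 : Int)])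
        else (pc ++ [pc.getD (i >>> 1) 0 + ((i &&& 1 : Nat) : Int)],
              bl ++ [bl.getD (i >>> 1) 0 + 1])
      let total := if 2 * pc.getD i 0 < bl.getD i 0 then total + (i : Int) else total
      (pc, bl, total))
    ([], [], 0)).2.2

-- ===== PRECONDITION & SPEC =====
def Spec_suma_cero_dominantes_menores (n : Int) (out : Int) : Prop := out = suma_cero_dominantes_menores_alt n
instance (n : Int) (out : Int) : Decidable (Spec_suma_cero_dominantes_menores n out) := by unfold Spec_suma_cero_dominantes_menores; infer_instance

-- ===== CLAIM (what is proved, stated in full; the proofs are below) =====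
def Claim_equal_suma_cero_dominantes_menores : Prop := ∀ (n : Int), Dom_suma_cero_dominantes_menores n → Spec_suma_cero_dominantes_menores n (suma_cero_dominantes_menores n)

-- ===== LEMMAS AND PROOFS =====

-- number of binary digits of m (bin(0) = '0' has one digit)
def blen (m : Nat) : Nat := if m = 0 then 1 else PySem.Int.bitLength (m : Int)

-- the common canonical sum both ports are reduced to
def canonSum (k : Nat) : Int :=
  (List.range k).foldl
    (fun vr (i : Nat) => if 2 * PySem.Int.bitCount (i : Int) < blen i then vr + (i : Int) else vr) 0

lemma toDigitsCore_acc (b : Nat) : ∀ (f n : Nat) (l : List Char),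
    Nat.toDigitsCore b f n l = Nat.toDigitsCore b f n [] ++ l := by
  intro f
  induction f with
  | zero => intro n l; simp [Nat.toDigitsCore]
  | succ f ih =>
    intro n l
    simp only [Nat.toDigitsCore]
    by_cases h : n / b = 0
    · simp [h]
    · simp only [h, if_false]
      rw [ih (n / b) (Nat.digitChar (n % b) :: l), ih (n / b) [Nat.digitChar (n % b)]]
      simp

lemma toDigitsCore_fuel (b : Nat) (hb : 2 ≤ b) : ∀ (n f f' : Nat), n < f → n < f' →
    ∀ l, Nat.toDigitsCore b f n l = Nat.toDigitsCore b f' n l := by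
  intro n
  induction n using Nat.strong_induction_on with
  | _ n ih =>
    intro f f' hf hf' l
    match f, f' with
    | f + 1, f' + 1 =>
      simp only [Nat.toDigitsCore]
      by_cases h : n / b = 0
      · simp [h]
      · simp only [h, if_false]
        have hn : 0 < n := by
          rcases Nat.eq_zero_or_pos n with h0 | h0
          · exact absurd (by simp [h0]) h
          · exact h0
        have hlt : n / b < n := Nat.div_lt_self hn (by omega)
        exact ih (n / b) hlt f f' (by omega) (by omega) _

lemma toDigits_step (n : Nat) (h : 2 ≤ n) :
    Nat.toDigits 2 n = Nat.toDigits 2 (n / 2) ++ [Nat.digitChar (n % 2)] := by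
  have h2 : n / 2 ≠ 0 := by omega
  show Nat.toDigitsCore 2 (n + 1) n [] = Nat.toDigitsCore 2 (n / 2 + 1) (n / 2) [] ++ _
  conv_lhs => rw [show Nat.toDigitsCore 2 (n + 1) n [] =
    Nat.toDigitsCore 2 n (n / 2) [Nat.digitChar (n % 2)] from by
      simp [Nat.toDigitsCore, h2]]
  rw [toDigitsCore_acc,
    toDigitsCore_fuel 2 (by norm_num) (n / 2) n (n / 2 + 1) (by omega) (by omega)]

lemma count1_toDigits : ∀ m : Nat, (Nat.toDigits 2 m).count '1' = PySem.Int.bitCount (m : Int) := by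
  intro m
  induction m using Nat.strong_induction_on with
  | _ m ih =>
    match m, Nat.lt_or_ge m 2 with
    | 0, _ => decide
    | 1, _ => decide
    | (m + 2), _ =>
      rw [toDigits_step (m + 2) (by omega), List.count_append]
      have ihq := ih ((m + 2) / 2) (by omega)
      have hbc := PySem.Int.bitCount_natCast (m := m + 2) (by omega)
      rcases Nat.mod_two_eq_zero_or_one (m + 2) with h2 | h2
      · rw [show Nat.digitChar ((m + 2) % 2) = '0' from by rw [h2]; rfl,
          show List.count '1' ['0'] = 0 from by decide]
        omega
      · rw [show Nat.digitChar ((m + 2) % 2) = '1' from by rw [h2]; rfl,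
          show List.count '1' ['1'] = 1 from by decide]
        omega

lemma count0_toDigits : ∀ m : Nat,
    (Nat.toDigits 2 m).count '0' + PySem.Int.bitCount (m : Int) = blen m := by
  intro m
  induction m using Nat.strong_induction_on with
  | _ m ih =>
    match m, Nat.lt_or_ge m 2 with
    | 0, _ => decide
    | 1, _ => decide
    | (m + 2), _ =>
      have hb : blen (m + 2) = blen ((m + 2) / 2) + 1 := by
        have hbl := PySem.Int.bitLength_natCast (m := m + 2) (by omega)
        have h2 : (m + 2) / 2 ≠ 0 := by omega
        unfold blen
        simp only [show m + 2 ≠ 0 from by omega, if_false, h2]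
        rw [hbl]
      rw [toDigits_step (m + 2) (by omega), List.count_append]
      have ihq := ih ((m + 2) / 2) (by omega)
      have hbc := PySem.Int.bitCount_natCast (m := m + 2) (by omega)
      rcases Nat.mod_two_eq_zero_or_one (m + 2) with h2 | h2
      · rw [show Nat.digitChar ((m + 2) % 2) = '0' from by rw [h2]; rfl,
          show List.count '0' ['0'] = 1 from by decide]
        omega
      · rw [show Nat.digitChar ((m + 2) % 2) = '1' from by rw [h2]; rfl,
          show List.count '0' ['1'] = 0 from by decide]
        omega

lemma cantidad_de_0_eq (s : List Char) : cantidad_de_0 s = (s.count '0' : Int) := by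
  unfold cantidad_de_0
  rw [PySem.List.foldl_ite_add_one (fun c => c = '0') s 0, List.count_eq_countP, zero_add]
  exact congrArg Nat.cast (List.countP_congr (fun a _ => by simp))

lemma cantidad_de_1_eq (s : List Char) : cantidad_de_1 s = (s.count '1' : Int) := by
  unfold cantidad_de_1
  rw [PySem.List.foldl_ite_add_one (fun c => c = '1') s 0, List.count_eq_countP, zero_add]
  exact congrArg Nat.cast (List.countP_congr (fun a _ => by simp))

lemma binario_eq (m : Nat) :
    PySem.List.slice (PySem.Int.toBinChars0b (m : Int)) (some 2) none = Nat.toDigits 2 m := by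
  have : PySem.Int.toBinChars0b (m : Int) = '0' :: 'b' :: Nat.toDigits 2 m := by
    unfold PySem.Int.toBinChars0b
    simp
  rw [this]
  have h2 : ((2 : Int)) = ((2 : Nat) : Int) := by norm_num
  rw [h2, PySem.List.slice_from_natCast]
  rfl

lemma es_kdominante_eq (m : Nat) :
    es_kdominante 0 (m : Int) = decide (2 * PySem.Int.bitCount (m : Int) < blen m) := by
  simp only [es_kdominante, binario_eq m, cantidad_de_0_eq, cantidad_de_1_eq,
    show ((0 : Int) = 1) = False from by simp, false_and, if_false, gt_iff_lt]
  simp only [true_and]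
  have h0 := count0_toDigits m
  have h1 := count1_toDigits m
  by_cases h : 2 * PySem.Int.bitCount (m : Int) < blen m
  · rw [if_pos (by omega), decide_eq_true h]
  · rw [if_neg (by omega)]
    simp [h]

lemma portA_eq_canon (n : Int) : suma_cero_dominantes_menores n = canonSum n.toNat := by
  unfold suma_cero_dominantes_menores canonSum
  apply PySem.List.foldl_congr_mem
  intro acc i _
  rw [es_kdominante_eq i]
  by_cases h : 2 * PySem.Int.bitCount (i : Int) < blen i <;> simp [h]

lemma canonSum_succ (k : Nat) :
    canonSum (k + 1) =
      if 2 * PySem.Int.bitCount (k : Int) < blen k then canonSum k + (k : Int) else canonSum k := by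
  unfold canonSum
  rw [List.range_succ, List.foldl_append]
  simp

lemma getD_map_range {f : Nat → Int} {k j : Nat} (h : j < k) :
    ((List.range k).map f).getD j 0 = f j := by
  rw [List.getD_eq_getElem?_getD]
  simp [h]

lemma portB_invariant (k : Nat) :
    (List.range k).foldl
      (fun (st : List Int × List Int × Int) (i : Nat) =>
        let pc := st.1
        let bl := st.2.1
        let total := st.2.2
        let (pc, bl) :=
          if i ≤ 1 then (pc ++ [(i : Int)], bl ++ [(1 : Int)])
          else (pc ++ [pc.getD (i >>> 1) 0 + ((i &&& 1 : Nat) : Int)],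
                bl ++ [bl.getD (i >>> 1) 0 + 1])
        let total := if 2 * pc.getD i 0 < bl.getD i 0 then total + (i : Int) else total
        (pc, bl, total))
      ([], [], 0)
    = ((List.range k).map (fun (i : Nat) => (PySem.Int.bitCount (i : Int) : Int)),
       (List.range k).map (fun (i : Nat) => (blen i : Int)),
       canonSum k) := by
  induction k with
  | zero => simp [canonSum]
  | succ k ih =>
    rw [List.range_succ, List.foldl_append, ih]
    simp only [List.foldl_cons, List.foldl_nil]
    have hpc : (if k ≤ 1 then
          ((List.range k).map (fun (i : Nat) => (PySem.Int.bitCount (i : Int) : Int)) ++ [(k : Int)],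
           (List.range k).map (fun (i : Nat) => ((blen i : Nat) : Int)) ++ [(1 : Int)])
        else
          ((List.range k).map (fun (i : Nat) => (PySem.Int.bitCount (i : Int) : Int)) ++
             [((List.range k).map (fun (i : Nat) => (PySem.Int.bitCount (i : Int) : Int))).getD (k >>> 1) 0 +
               ((k &&& 1 : Nat) : Int)],
           (List.range k).map (fun (i : Nat) => ((blen i : Nat) : Int)) ++
             [((List.range k).map (fun (i : Nat) => ((blen i : Nat) : Int))).getD (k >>> 1) 0 + 1]))
        = ((List.range k).map (fun (i : Nat) => (PySem.Int.bitCount (i : Int) : Int)) ++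
             [(PySem.Int.bitCount (k : Int) : Int)],
           (List.range k).map (fun (i : Nat) => ((blen i : Nat) : Int)) ++ [((blen k : Nat) : Int)]) := by
      by_cases hk : k ≤ 1
      · rw [if_pos hk]
        interval_cases k <;> simp <;> decide
      · rw [if_neg hk]
        have hhalf : k >>> 1 = k / 2 := Nat.shiftRight_one k
        have hlt : k / 2 < k := Nat.div_lt_self (by omega) (by omega)
        have hand : (k &&& 1) = k % 2 := Nat.and_one_is_mod k
        rw [hhalf, hand, getD_map_range hlt, getD_map_range hlt]
        have h1 : ((PySem.Int.bitCount ((k / 2 : Nat) : Int) : Int) + ((k % 2 : Nat) : Int))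
            = ((PySem.Int.bitCount (k : Int) : Int)) := by
          rw [PySem.Int.bitCount_natCast (m := k) (by omega)]
          push_cast
          ring
        have h2 : ((blen (k / 2) : Int) + 1) = ((blen k : Int)) := by
          have hbl := PySem.Int.bitLength_natCast (m := k) (by omega)
          have hq : k / 2 ≠ 0 := by omega
          unfold blen
          simp only [show k ≠ 0 from by omega, if_false, hq]
          rw [hbl]
          push_cast
          ring
        rw [h1, h2]
    rw [hpc]
    have hgpc : ((List.range k).map (fun (i : Nat) => (PySem.Int.bitCount (i : Int) : Int)) ++
        [(PySem.Int.bitCount (k : Int) : Int)]).getD k 0 = (PySem.Int.bitCount (k : Int) : Int) := by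
      rw [List.getD_eq_getElem?_getD, List.getElem?_append_right (by simp)]
      simp
    have hgbl : ((List.range k).map (fun (i : Nat) => ((blen i : Nat) : Int)) ++
        [((blen k : Nat) : Int)]).getD k 0 = ((blen k : Nat) : Int) := by
      rw [List.getD_eq_getElem?_getD, List.getElem?_append_right (by simp)]
      simp
    simp only [hgpc, hgbl]
    rw [canonSum_succ]
    simp only [List.map_append, List.map_cons, List.map_nil]
    by_cases h : 2 * PySem.Int.bitCount (k : Int) < blen k
    · rw [if_pos (show (2 * (PySem.Int.bitCount (k : Int) : Int) < (blen k : Int)) from by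
        exact_mod_cast h), if_pos h]
    · rw [if_neg (show ¬ (2 * (PySem.Int.bitCount (k : Int) : Int) < (blen k : Int)) from by
        exact_mod_cast h), if_neg h]

lemma portB_eq_canon (n : Int) : suma_cero_dominantes_menores_alt n = canonSum n.toNat := by
  unfold suma_cero_dominantes_menores_alt
  rw [portB_invariant n.toNat]

-- ===== VERDICT (by name: the statement is the Claim_ definition above) =====
theorem suma_cero_dominantes_menores_spec : Claim_equal_suma_cero_dominantes_menores := by
  intro n _
  unfold Spec_suma_cero_dominantes_menores
  rw [portA_eq_canon, portB_eq_canon]
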